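-- pv_equiv track=rewrite | github.com/MichelleWillaQu/Code-Challenges | waterflow.py | recursiveWaterTravel
-- ===== SOURCE A (Python) =====
-- def recursiveWaterTravel(blueprint, coords, visited=None):
--     if not visited:
--         visited = set()
--     if coords[0] == len(blueprint) - 1:
--         # Traveled to the bottom row
--         return True
--     visited.add(coords)
--     moves = valid_moves(blueprint, coords)
--     for move in moves:
--         if move in visited:
--             continue
--         return_value = recursiveWaterTravel(blueprint, move, visited)
--         if return_value:
--             return True
--     return False
--
-- def valid_moves(blueprint, coords):
--     output_lst = []
--     # Down
--     if (
--         coords[0] < len(blueprint) - 1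
--         and blueprint[coords[0] + 1][coords[1]] == 0
--     ):
--         output_lst.append((coords[0] + 1, coords[1]))
--     # Left
--     if coords[1] > 0 and blueprint[coords[0]][coords[1] - 1] == 0:
--         output_lst.append((coords[0], coords[1] - 1))
--     # Right
--     if (
--         coords[1] < len(blueprint[0]) - 1
--         and blueprint[coords[0]][coords[1] + 1] == 0
--     ):
--         output_lst.append((coords[0], coords[1] + 1))
--     return output_lst
-- ===== SOURCE B (Python) =====
-- # Iterative DFS with an explicit stack instead of recursion; same pop/visit order,
-- # same in-place mutation of a caller-passed visited set, same return value.
-- def recursiveWaterTravel(blueprint, coords, visited=None):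
--     if not visited:
--         visited = set()
--     if coords[0] == len(blueprint) - 1:
--         return True
--     visited.add(coords)
--     stack = list(reversed(valid_moves(blueprint, coords)))
--     while stack:
--         c = stack.pop()
--         if c in visited:
--             continue
--         if c[0] == len(blueprint) - 1:
--             return True
--         visited.add(c)
--         stack.extend(reversed(valid_moves(blueprint, c)))
--     return False
--
-- def valid_moves(blueprint, coords):
--     output_lst = []
--     # Down
--     if (
--         coords[0] < len(blueprint) - 1
--         and blueprint[coords[0] + 1][coords[1]] == 0
--     ):
--         output_lst.append((coords[0] + 1, coords[1]))
--     # Left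
--     if coords[1] > 0 and blueprint[coords[0]][coords[1] - 1] == 0:
--         output_lst.append((coords[0], coords[1] - 1))
--     # Right
--     if (
--         coords[1] < len(blueprint[0]) - 1
--         and blueprint[coords[0]][coords[1] + 1] == 0
--     ):
--         output_lst.append((coords[0], coords[1] + 1))
--     return output_lst
-- ===== Notes on version B (the rewrite author's own statement) =====
-- stated objective: alternative
-- what changed: Replaces A's recursion (with its shared, in-place-mutated visited set and early-return unwinding) by an iterative DFS over an explicit stack that pops cells in the same order, skipping already-visited cells on pop; valid_moves is kept identical.
-- outside the precondition, e.g. on recursiveWaterTravel([[0, 1], [0, 1, 0], [0, 0]], (0, -1), None): A returns True, B returns True; on recursiveWaterTravel([[0], [0]], (5, 0), None): A returns False, B returns False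
import Mathlib
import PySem

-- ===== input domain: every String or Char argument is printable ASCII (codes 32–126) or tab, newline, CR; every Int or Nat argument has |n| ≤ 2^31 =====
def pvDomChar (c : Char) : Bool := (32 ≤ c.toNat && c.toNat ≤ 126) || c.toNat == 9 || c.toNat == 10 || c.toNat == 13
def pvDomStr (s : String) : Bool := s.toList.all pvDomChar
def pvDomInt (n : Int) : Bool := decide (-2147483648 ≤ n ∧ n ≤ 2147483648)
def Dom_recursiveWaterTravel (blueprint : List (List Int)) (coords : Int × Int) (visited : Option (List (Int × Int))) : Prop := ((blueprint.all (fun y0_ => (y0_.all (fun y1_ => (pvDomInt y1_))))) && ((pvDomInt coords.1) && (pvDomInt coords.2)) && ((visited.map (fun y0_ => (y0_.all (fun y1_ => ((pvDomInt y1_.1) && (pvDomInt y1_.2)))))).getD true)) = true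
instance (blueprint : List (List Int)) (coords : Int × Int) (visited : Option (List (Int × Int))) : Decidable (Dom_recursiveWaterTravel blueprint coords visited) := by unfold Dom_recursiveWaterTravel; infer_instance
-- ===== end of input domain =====

-- B replaces A's recursion (with its shared mutated visited set) by an iterative DFS over an
-- explicit stack, same objective ("alternative"); both mutate the caller's visited set identically.

-- ===== PORT A =====
-- blueprint[r][c] == 0, with Python's negative-index wraparound; `none` (IndexError) is outside Pre_
-- and makes the condition false here.
def pvCellZero (bp : List (List Int)) (r c : Int) : Bool :=
  ((PySem.List.pyGet? bp r).bind (fun row => PySem.List.pyGet? row c)) == some 0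

-- helper valid_moves, identical in Source A and Source B (shared by both ports)
def validMoves (bp : List (List Int)) (co : Int × Int) : List (Int × Int) :=
  let out1 : List (Int × Int) :=
    if co.1 < (bp.length : Int) - 1 && pvCellZero bp (co.1 + 1) co.2 then [(co.1 + 1, co.2)] else []
  let out2 : List (Int × Int) :=
    out1 ++ (if co.2 > 0 && pvCellZero bp co.1 (co.2 - 1) then [(co.1, co.2 - 1)] else [])
  -- len(blueprint[0]); bp = [] raises in Python (outside Pre_), the default 0 is never read inside Pre_
  let w0 : Int := ((PySem.List.pyGet? bp (0 : Int)).map (fun r => (r.length : Int))).getD 0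
  out2 ++ (if co.2 < w0 - 1 && pvCellZero bp co.1 (co.2 + 1) then [(co.1, co.2 + 1)] else [])

-- `if not visited: visited = set()` (a Python set arrives as its distinct-element list)
def pvInitVis (visited : Option (List (Int × Int))) : PySem.Set (Int × Int) :=
  match visited with
  | none => PySem.Set.empty
  | some l => if l.isEmpty then PySem.Set.empty else l

-- termination helper for the fuel-threading in loopA below (cited in its decreasing_by)
lemma lexMinHelper (a f n m : Nat) (h : n < m) :
    Prod.Lex (· < ·) (· < ·) (min a f, n) (f, m) := by
  rcases Nat.lt_or_ge (min a f) f with h' | h'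
  · exact Prod.Lex.left _ _ h'
  · have h2 : min a f = f := Nat.le_antisymm (Nat.min_le_right _ _) h'
    rw [h2]; exact Prod.Lex.right _ h

-- A's recursion, with the shared mutated `visited` threaded through and a fuel counter
-- (totality artifact: one unit per processed non-bottom cell; never exhausted on Pre_ inputs).
-- Result: (return value, visited after the call, remaining fuel).
mutual
def goA (bp : List (List Int)) (f : Nat) (c : Int × Int) (vis : PySem.Set (Int × Int)) :
    Bool × PySem.Set (Int × Int) × Nat :=
  if c.1 = (bp.length : Int) - 1 then (true, vis, f)
  else
    match f with
    | 0 => (false, vis, 0)          -- fuel exhausted (unreachable inside Pre_)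
    | Nat.succ f' => loopA bp f' (validMoves bp c) (PySem.Set.add vis c)
termination_by (f, 0)
decreasing_by
  exact Prod.Lex.left _ _ (Nat.lt_succ_self _)

def loopA (bp : List (List Int)) (f : Nat) (ms : List (Int × Int)) (vis : PySem.Set (Int × Int)) :
    Bool × PySem.Set (Int × Int) × Nat :=
  match ms with
  | [] => (false, vis, f)
  | m :: rest =>
    if PySem.Set.contains vis m then loopA bp f rest vis
    else
      let r := goA bp f m vis
      if r.1 then r else loopA bp (min r.2.2 f) rest r.2.1
      -- `min … f` is a termination guard only: remaining fuel never exceeds f (goA_fuel_le below)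
termination_by (f, ms.length + 1)
decreasing_by
  all_goals first
    | (apply Prod.Lex.right; simp only [List.length_cons]; omega)
    | (apply lexMinHelper; simp only [List.length_cons]; omega)
end

def recursiveWaterTravel (blueprint : List (List Int)) (coords : Int × Int) (visited : Option (List (Int × Int))) : Bool :=
  (goA blueprint (blueprint.flatten.length * 4 + 1) coords (pvInitVis visited)).1

-- ===== PORT B =====
-- Source B's while-loop: stack head = top of stack; pushing reversed(valid_moves) and popping from the
-- end visits the moves in list order, i.e. the new stack is `validMoves ++ rest`.
def goB (bp : List (List Int)) (f : Nat) (stack : List (Int × Int)) (vis : PySem.Set (Int × Int)) : Bool :=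
  match stack with
  | [] => false
  | c :: rest =>
    if PySem.Set.contains vis c then goB bp f rest vis
    else if c.1 = (bp.length : Int) - 1 then true
    else
      match f with
      | 0 => goB bp 0 rest vis      -- fuel exhausted (totality artifact, unreachable inside Pre_)
      | Nat.succ f' => goB bp f' (validMoves bp c ++ rest) (PySem.Set.add vis c)
termination_by (f, stack.length)
decreasing_by
  · exact Prod.Lex.right _ (Nat.lt_succ_self _)
  · exact Prod.Lex.right _ (Nat.lt_succ_self _)
  · exact Prod.Lex.left _ _ (Nat.lt_succ_self _)

def recursiveWaterTravel_alt (blueprint : List (List Int)) (coords : Int × Int) (visited : Option (List (Int × Int))) : Bool :=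
  if coords.1 = (blueprint.length : Int) - 1 then true
  else goB blueprint (blueprint.flatten.length * 4) (validMoves blueprint coords)
         (PySem.Set.add (pvInitVis visited) coords)

-- ===== PRECONDITION & SPEC =====
-- Pre_ admits the start-on-bottom-row case (A returns True before indexing anything) and any
-- rectangular non-empty grid with start coordinates in [-rows, rows) x [-cols, cols) (Python's
-- negative-index wraparound keeps every access of the traversal in range there).  It excludes the
-- inputs on which Python raises IndexError (ragged rows, empty grid, coordinates beyond the
-- wraparound range) — but whether A raises on such inputs depends on the whole traversal, which is
-- not a closed-form condition on the input, so Pre_ also excludes ragged/far-out-of-range inputs on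
-- which A happens to return without indexing anything; B returns the same values there (see cites).
def Pre_recursiveWaterTravel (blueprint : List (List Int)) (coords : Int × Int) (visited : Option (List (Int × Int))) : Prop :=
  coords.1 = (blueprint.length : Int) - 1 ∨
  (blueprint ≠ [] ∧ (∀ row ∈ blueprint, row.length = (blueprint.headD []).length) ∧
   -(blueprint.length : Int) ≤ coords.1 ∧ coords.1 < blueprint.length ∧
   -((blueprint.headD []).length : Int) ≤ coords.2 ∧ coords.2 < (blueprint.headD []).length)
instance (blueprint : List (List Int)) (coords : Int × Int) (visited : Option (List (Int × Int))) : Decidable (Pre_recursiveWaterTravel blueprint coords visited) := by unfold Pre_recursiveWaterTravel; infer_instance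

def pvWitness_recursiveWaterTravel : List (List Int) × (Int × Int) × (Option (List (Int × Int))) :=
  ([[0, 1], [0, 0]], (0, 0), none)

def Spec_recursiveWaterTravel (blueprint : List (List Int)) (coords : Int × Int) (visited : Option (List (Int × Int))) (out : Bool) : Prop := out = recursiveWaterTravel_alt blueprint coords visited
instance (blueprint : List (List Int)) (coords : Int × Int) (visited : Option (List (Int × Int))) (out : Bool) : Decidable (Spec_recursiveWaterTravel blueprint coords visited out) := by unfold Spec_recursiveWaterTravel; infer_instance

-- ===== CLAIM (what is proved, stated in full; the proofs are below) =====
def Claim_equal_recursiveWaterTravel : Prop := ∀ (blueprint : List (List Int)) (coords : Int × Int) (visited : Option (List (Int × Int))), Dom_recursiveWaterTravel blueprint coords visited → Pre_recursiveWaterTravel blueprint coords visited → Spec_recursiveWaterTravel blueprint coords visited (recursiveWaterTravel blueprint coords visited)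

-- ===== LEMMAS AND PROOFS =====

-- remaining fuel never grows
lemma goA_fuel_le (bp : List (List Int)) :
    ∀ f : Nat, (∀ c vis, (goA bp f c vis).2.2 ≤ f) ∧ (∀ ms vis, (loopA bp f ms vis).2.2 ≤ f) := by
  intro f
  induction f using Nat.strong_induction_on with
  | _ f IH =>
    have hgo : ∀ c vis, (goA bp f c vis).2.2 ≤ f := by
      intro c vis
      cases f with
      | zero =>
        rw [goA.eq_def]
        by_cases hb : c.1 = (bp.length : Int) - 1 <;> simp [hb]
      | succ f' =>
        rw [goA.eq_def]
        by_cases hb : c.1 = (bp.length : Int) - 1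
        · simp [hb]
        · simp only [hb, if_false]
          exact Nat.le_trans ((IH f' (Nat.lt_succ_self _)).2 _ _) (Nat.le_succ _)
    have hloop : ∀ ms vis, (loopA bp f ms vis).2.2 ≤ f := by
      intro ms
      induction ms with
      | nil => intro vis; rw [loopA.eq_def]
      | cons m rest ih =>
        intro vis
        rw [loopA.eq_def]
        by_cases hm : PySem.Set.contains vis m
        · simp only [hm, if_true]; exact ih vis
        · simp only [hm, Bool.false_eq_true, if_false]
          by_cases hr : (goA bp f m vis).1
          · simp only [hr, if_true]; exact hgo m vis
          · simp only [hr, Bool.false_eq_true, if_false]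
            rcases Nat.lt_or_ge (min (goA bp f m vis).2.2 f) f with h | h
            · exact Nat.le_trans ((IH _ h).2 _ _) (Nat.le_of_lt h)
            · have hmin : min (goA bp f m vis).2.2 f = f :=
                Nat.le_antisymm (Nat.min_le_right _ _) h
              rw [hmin]; exact ih _
    exact ⟨hgo, hloop⟩

-- The step-for-step simulation: running B's stack loop on `ms ++ K` is running A's for-loop on the
-- moves `ms` and then continuing with the rest of the stack `K` with the fuel and visited set A left.
lemma sim (bp : List (List Int)) :
    ∀ f : Nat,
      (∀ c vis K, ¬ PySem.Set.contains vis c →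
        goB bp f (c :: K) vis =
          (if (goA bp f c vis).1 then true else goB bp (goA bp f c vis).2.2 K (goA bp f c vis).2.1)) ∧
      (∀ ms K vis,
        goB bp f (ms ++ K) vis =
          (if (loopA bp f ms vis).1 then true
           else goB bp (loopA bp f ms vis).2.2 K (loopA bp f ms vis).2.1)) := by
  intro f
  induction f using Nat.strong_induction_on with
  | _ f IH =>
    have hsim : ∀ c vis K, ¬ PySem.Set.contains vis c →
        goB bp f (c :: K) vis =
          (if (goA bp f c vis).1 then true else goB bp (goA bp f c vis).2.2 K (goA bp f c vis).2.1) := by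
      intro c vis K hc
      have hc' : c ∉ vis := by simpa using hc
      by_cases hb : c.1 = (bp.length : Int) - 1
      · rw [goB.eq_def, goA.eq_def]
        simp [hc', hb]
      · cases f with
        | zero =>
          rw [goB.eq_def, goA.eq_def]
          simp [hc', hb]
        | succ f' =>
          rw [goB.eq_def, goA.eq_def]
          simp only [hc, Bool.false_eq_true, if_false, hb]
          exact (IH f' (Nat.lt_succ_self _)).2 (validMoves bp c) K (PySem.Set.add vis c)
    have hloop : ∀ ms K vis,
        goB bp f (ms ++ K) vis =
          (if (loopA bp f ms vis).1 then true
           else goB bp (loopA bp f ms vis).2.2 K (loopA bp f ms vis).2.1) := by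
      intro ms
      induction ms with
      | nil => intro K vis; rw [loopA.eq_def]; simp
      | cons m rest ih =>
        intro K vis
        by_cases hm : PySem.Set.contains vis m
        · have hm' : m ∈ vis := by simpa using hm
          have h1 : loopA bp f (m :: rest) vis = loopA bp f rest vis := by
            rw [loopA.eq_def]; simp [hm']
          have h2 : goB bp f ((m :: rest) ++ K) vis = goB bp f (rest ++ K) vis := by
            rw [List.cons_append, goB.eq_def]; simp [hm']
          rw [h2, h1]; exact ih K vis
        · have hm' : m ∉ vis := by simpa using hm
          have hstep := hsim m vis (rest ++ K) hm
          have h1 : loopA bp f (m :: rest) vis =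
              (if (goA bp f m vis).1 then goA bp f m vis
               else loopA bp (min (goA bp f m vis).2.2 f) rest (goA bp f m vis).2.1) := by
            rw [loopA.eq_def]; simp [hm']
          rw [List.cons_append, hstep, h1]
          by_cases hr : (goA bp f m vis).1
          · simp [hr]
          · have hle : (goA bp f m vis).2.2 ≤ f := (goA_fuel_le bp f).1 m vis
            have hmin : min (goA bp f m vis).2.2 f = (goA bp f m vis).2.2 := Nat.min_eq_left hle
            simp only [hr, Bool.false_eq_true, if_false, hmin]
            rcases Nat.lt_or_ge (goA bp f m vis).2.2 f with h | h
            · exact (IH _ h).2 rest K (goA bp f m vis).2.1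
            · have hf : (goA bp f m vis).2.2 = f := Nat.le_antisymm hle h
              rw [hf]; exact ih K (goA bp f m vis).2.1
    exact ⟨hsim, hloop⟩

-- ===== VERDICT (by name: the statement is the Claim_ definition above) =====
theorem recursiveWaterTravel_spec : Claim_equal_recursiveWaterTravel := by
  intro bp coords visited _ _
  unfold Spec_recursiveWaterTravel recursiveWaterTravel recursiveWaterTravel_alt
  by_cases hb : coords.1 = (bp.length : Int) - 1
  · rw [goA.eq_def]; simp [hb]
  · have hA : goA bp (bp.flatten.length * 4 + 1) coords (pvInitVis visited) =
        loopA bp (bp.flatten.length * 4) (validMoves bp coords)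
          (PySem.Set.add (pvInitVis visited) coords) := by
      rw [goA.eq_def]; simp [hb]
    have h := (sim bp (bp.flatten.length * 4)).2 (validMoves bp coords) []
      (PySem.Set.add (pvInitVis visited) coords)
    rw [List.append_nil] at h
    have hnil : ∀ (g : Nat) (v : PySem.Set (Int × Int)), goB bp g [] v = false := by
      intro g v; rw [goB.eq_def]
    simp only [hb, if_false]
    rw [hA, h, hnil]
    cases hcv : (loopA bp (bp.flatten.length * 4) (validMoves bp coords)
        (PySem.Set.add (pvInitVis visited) coords)).1 <;> rfl
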